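-- pv_equiv track=rewrite | github.com/Franciscoj04/-LFP-VJ-202006716-P1 | Proyecto1/Principal.py | AFDCOMENTSIMPLE
-- ===== SOURCE A (Python) =====
-- def AFDCOMENTSIMPLE(lexema):
--     estado=0
--     aceptacion=[2]
--
--     for coment in lexema:
--         if estado==0:
--             if coment =="/":
--                 estado=1
--             else:
--                 estado=-1
--         elif estado==1:
--             if coment=="/":
--                 estado=2
--             else:
--                 estado=-1
--         elif estado==2:
--             if coment !='\n':
--                 estado=2
--             else:
--                 estado=-1
--         if estado==-1:
--             return False
--     return estado in aceptacion
-- ===== SOURCE B (Python) =====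
-- def AFDCOMENTSIMPLE(lexema):
--     return lexema.startswith("//") and "\n" not in lexema[2:]
-- ===== Notes on version B (the rewrite author's own statement) =====
-- stated objective: simpler
-- what changed: Replaces the per-character DFA state loop with a closed-form predicate: the string starts with two slashes and the rest of it contains no newline.
import Mathlib
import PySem

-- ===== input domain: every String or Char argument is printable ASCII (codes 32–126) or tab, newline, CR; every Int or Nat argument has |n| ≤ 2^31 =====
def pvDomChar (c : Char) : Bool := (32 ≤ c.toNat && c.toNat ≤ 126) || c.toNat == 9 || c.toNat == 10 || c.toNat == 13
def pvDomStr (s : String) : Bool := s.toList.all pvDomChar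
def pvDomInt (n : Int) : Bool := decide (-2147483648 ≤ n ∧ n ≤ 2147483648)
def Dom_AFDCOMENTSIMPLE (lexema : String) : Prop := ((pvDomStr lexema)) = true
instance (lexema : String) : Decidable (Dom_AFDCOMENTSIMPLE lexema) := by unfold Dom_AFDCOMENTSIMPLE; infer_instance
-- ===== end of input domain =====

-- B replaces A's per-character DFA loop by a closed-form predicate (prefix "//" and no newline after it); equivalence proved on all strings.

-- ===== PORT A =====
-- the for-loop over the characters, threading 'estado'; returning false the moment estado = -1
def pvLoopA : List Char → Int → Bool
  | [], estado => decide (estado ∈ [(2 : Int)])   -- 'return estado in aceptacion'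
  | coment :: rest, estado =>
      let estado' : Int :=
        if estado == 0 then (if coment == '/' then 1 else -1)
        else if estado == 1 then (if coment == '/' then 2 else -1)
        else if estado == 2 then (if coment != '\n' then 2 else -1)
        else estado
      if estado' == -1 then false else pvLoopA rest estado'

def AFDCOMENTSIMPLE (lexema : String) : Bool := pvLoopA lexema.toList 0

-- ===== PORT B =====
def AFDCOMENTSIMPLE_alt (lexema : String) : Bool :=
  PySem.Str.startswith lexema "//" && !(PySem.Str.isIn "\n" (PySem.Str.slice lexema (some 2) none))

-- ===== PRECONDITION & SPEC =====
def Spec_AFDCOMENTSIMPLE (lexema : String) (out : Bool) : Prop := out = AFDCOMENTSIMPLE_alt lexema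
instance (lexema : String) (out : Bool) : Decidable (Spec_AFDCOMENTSIMPLE lexema out) := by unfold Spec_AFDCOMENTSIMPLE; infer_instance

-- ===== CLAIM (what is proved, stated in full; the proofs are below) =====
def Claim_equal_AFDCOMENTSIMPLE : Prop := ∀ (lexema : String), Dom_AFDCOMENTSIMPLE lexema → Spec_AFDCOMENTSIMPLE lexema (AFDCOMENTSIMPLE lexema)

-- ===== LEMMAS AND PROOFS =====

-- in the accepting state 2, A's loop scans the rest and fails exactly on a newline
theorem pvLoopA_state2 (s : List Char) : pvLoopA s 2 = !decide ('\n' ∈ s) := by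
  induction s with
  | nil => decide
  | cons c t ih =>
      simp only [pvLoopA]
      by_cases hc : c = '\n'
      · subst hc; simp
      · simp [hc, ih, Ne.symm hc]

theorem pvLoopA_start (s : List Char) :
    pvLoopA s 0 = (PySem.Chars.startswith s ['/', '/'] && !(PySem.Chars.isIn ['\n'] (s.drop 2))) := by
  match s with
  | [] => decide
  | [c] =>
      by_cases hc : c = '/'
      · subst hc; decide
      · simp [pvLoopA, hc, Ne.symm hc, PySem.Chars.startswith]
  | c :: d :: t =>
      have hin : PySem.Chars.isIn ['\n'] t = decide ('\n' ∈ t) := by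
        by_cases h : '\n' ∈ t
        · simp [h]
          rw [PySem.Chars.isIn_iff_infix]
          exact (List.singleton_infix_iff _ _).mpr h
        · simp [h]
          rw [PySem.Chars.isIn_eq_false_iff]
          intro hinf
          exact h ((List.singleton_infix_iff _ _).mp hinf)
      by_cases hc : c = '/'
      · by_cases hd : d = '/'
        · subst hc; subst hd
          simp [pvLoopA, pvLoopA_state2, PySem.Chars.startswith, hin]
        · subst hc; simp [pvLoopA, hd, Ne.symm hd, PySem.Chars.startswith]
      · simp [pvLoopA, hc, Ne.symm hc, PySem.Chars.startswith]

-- ===== VERDICT (by name: the statement is the Claim_ definition above) =====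
theorem AFDCOMENTSIMPLE_spec : Claim_equal_AFDCOMENTSIMPLE := by
  intro lexema _
  unfold Spec_AFDCOMENTSIMPLE AFDCOMENTSIMPLE AFDCOMENTSIMPLE_alt
  rw [pvLoopA_start]
  have hslice : (PySem.Str.slice lexema (some 2) none).toList = lexema.toList.drop 2 := by
    rw [PySem.Str.toList_slice, PySem.Chars.slice_eq_listSlice,
        PySem.List.slice_from lexema.toList (show (0:Int) ≤ 2 by omega)]
    rfl
  simp [PySem.Str.startswith_eq, PySem.Str.isIn_eq, hslice]
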